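-- pv_equiv track=rewrite | github.com/longcule/rag-chatbot-uet | chatbot/cal_simil.py | count_blank
-- ===== SOURCE A (Python) =====
-- def count_blank(example_text):
--     count = 0
--     for char in example_text[1:]:
--         if char == ' ':
--             count += 1
--         else:
--             break
--     return count
-- ===== SOURCE B (Python) =====
-- def count_blank(example_text):
--     rest = example_text[1:]
--     return len(rest) - len(rest.lstrip(' '))
-- ===== Notes on version B (the rewrite author's own statement) =====
-- stated objective: idiomatic
-- what changed: Replaces the explicit counting loop with a strip-and-measure: the count of leading spaces of example_text[1:] is len(rest) - len(rest.lstrip(' ')).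
import Mathlib
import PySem

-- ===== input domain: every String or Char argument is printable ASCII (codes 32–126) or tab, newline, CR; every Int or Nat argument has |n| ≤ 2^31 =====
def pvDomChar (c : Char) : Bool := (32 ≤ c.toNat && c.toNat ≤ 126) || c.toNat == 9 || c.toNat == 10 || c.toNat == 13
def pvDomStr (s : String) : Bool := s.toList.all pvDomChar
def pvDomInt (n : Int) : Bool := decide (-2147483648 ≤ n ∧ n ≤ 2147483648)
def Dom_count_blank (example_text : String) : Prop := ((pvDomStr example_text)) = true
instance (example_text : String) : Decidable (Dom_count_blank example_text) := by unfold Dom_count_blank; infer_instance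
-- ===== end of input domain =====

-- B replaces A's explicit counting loop by strip-and-measure (len(rest) - len(rest.lstrip(' '))); same cost, more idiomatic.

-- ===== PORT A =====
-- the for-loop with break: count leading ' ' of the remaining characters
def countBlankLoop : List Char → Int → Int
  | [], acc => acc
  | c :: cs, acc => if c == ' ' then countBlankLoop cs (acc + 1) else acc

def count_blank (example_text : String) : Int :=
  countBlankLoop (PySem.List.slice example_text.toList (some 1) none) 0

-- ===== PORT B =====
-- rest.lstrip(' ') ported by hand as dropWhile (· == ' '): exact, since lstrip with an
-- explicit ' ' argument removes exactly the leading space characters.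
def count_blank_alt (example_text : String) : Int :=
  let rest := PySem.List.slice example_text.toList (some 1) none
  (rest.length : Int) - ((rest.dropWhile (fun c => c == ' ')).length : Int)

-- ===== PRECONDITION & SPEC =====
def Spec_count_blank (example_text : String) (out : Int) : Prop := out = count_blank_alt example_text
instance (example_text : String) (out : Int) : Decidable (Spec_count_blank example_text out) := by unfold Spec_count_blank; infer_instance

-- ===== CLAIM (what is proved, stated in full; the proofs are below) =====
def Claim_equal_count_blank : Prop := ∀ (example_text : String), Dom_count_blank example_text → Spec_count_blank example_text (count_blank example_text)

-- ===== LEMMAS AND PROOFS =====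
theorem countBlankLoop_eq (l : List Char) (acc : Int) :
    countBlankLoop l acc = acc + ((l.length : Int) - ((l.dropWhile (fun c => c == ' ')).length : Int)) := by
  induction l generalizing acc with
  | nil => simp [countBlankLoop]
  | cons c cs ih =>
    by_cases h : c = ' '
    · simp [countBlankLoop, h, ih]; push_cast; ring
    · have h' : (c == ' ') = false := by simp [h]
      simp [countBlankLoop, List.dropWhile, h']

-- ===== VERDICT (by name: the statement is the Claim_ definition above) =====
theorem count_blank_spec : Claim_equal_count_blank := by
  intro s _
  show count_blank s = count_blank_alt s
  simp [count_blank, count_blank_alt, countBlankLoop_eq]
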